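-- pv_equiv track=rewrite | github.com/djeada/Nauka-Programowania | src/python/09_listy_wprowadzenie/zad11.py | policz_samchody
-- ===== SOURCE A (Python) =====
-- def policz_samchody(lista):
--     licznik = 0
--     pom = 0
--     for samochod in lista:
--         if samochod == "A":
--             pom += 1
--         elif samochod == "B":
--             licznik += pom
--
--     return licznik
-- ===== SOURCE B (Python) =====
-- def policz_samchody(lista):
--     total = 0
--     for j, s in enumerate(lista):
--         if s == "B":
--             total += sum(1 for x in lista[:j] if x == "A")
--     return total
-- ===== Notes on version B (the rewrite author's own statement) =====
-- stated objective: alternative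
-- what changed: B counts ('A' before 'B') pairs directly with a nested pass (for each 'B' it counts the 'A's in the prefix) instead of A's single pass with a running 'pom' accumulator.
import Mathlib
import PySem

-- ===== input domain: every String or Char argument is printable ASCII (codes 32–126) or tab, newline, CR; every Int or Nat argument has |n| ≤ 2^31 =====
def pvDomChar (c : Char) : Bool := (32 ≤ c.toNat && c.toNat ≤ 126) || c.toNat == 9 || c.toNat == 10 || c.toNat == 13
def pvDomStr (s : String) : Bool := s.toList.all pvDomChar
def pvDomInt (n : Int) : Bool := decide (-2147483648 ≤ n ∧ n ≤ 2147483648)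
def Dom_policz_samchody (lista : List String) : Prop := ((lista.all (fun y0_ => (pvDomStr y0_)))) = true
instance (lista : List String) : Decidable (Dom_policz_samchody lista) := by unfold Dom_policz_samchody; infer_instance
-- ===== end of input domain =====

-- B replaces A's single-pass running-accumulator count with a direct nested pair count
-- (for each "B", count the "A"s in its prefix): an alternative algorithm of the same result.


-- ===== PORT A =====
-- A's for-loop carrying (licznik, pom), transliterated as structural recursion over the list.
def pvALoop (rest : List String) (licznik pom : Int) : Int :=
  match rest with
  | [] => licznik
  | s :: xs =>
      if s == "A" then pvALoop xs licznik (pom + 1)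
      else if s == "B" then pvALoop xs (licznik + pom) pom
      else pvALoop xs licznik pom

def policz_samchody (lista : List String) : Int := pvALoop lista 0 0

-- ===== PORT B =====
-- sum(1 for x in pref if x == "A")
def pvCountA (pref : List String) : Int :=
  match pref with
  | [] => 0
  | x :: xs => (if x == "A" then 1 else 0) + pvCountA xs

-- 'for j, s in enumerate(lista)': recursion over the remaining list carrying the index j;
-- lista[:j] is lista.take j.
def pvBLoop (lista rest : List String) (j : Nat) (total : Int) : Int :=
  match rest with
  | [] => total
  | s :: xs =>
      pvBLoop lista xs (j + 1)
        (if s == "B" then total + pvCountA (lista.take j) else total)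

def policz_samchody_alt (lista : List String) : Int := pvBLoop lista lista 0 0

-- ===== PRECONDITION & SPEC =====
def Spec_policz_samchody (lista : List String) (out : Int) : Prop := out = policz_samchody_alt lista
instance (lista : List String) (out : Int) : Decidable (Spec_policz_samchody lista out) := by unfold Spec_policz_samchody; infer_instance

-- ===== CLAIM (what is proved, stated in full; the proofs are below) =====
def Claim_equal_policz_samchody : Prop := ∀ (lista : List String), Dom_policz_samchody lista → Spec_policz_samchody lista (policz_samchody lista)

-- ===== LEMMAS AND PROOFS =====
theorem pvCountA_append (l : List String) (s : String) :
    pvCountA (l ++ [s]) = pvCountA l + (if s == "A" then 1 else 0) := by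
  induction l with
  | nil => simp [pvCountA]
  | cons x xs ih => simp [pvCountA, ih]; ring

theorem pvLoop_eq (rest : List String) : ∀ (pref : List String) (total : Int),
    pvBLoop (pref ++ rest) rest pref.length total = pvALoop rest total (pvCountA pref) := by
  induction rest with
  | nil => intro pref total; simp [pvBLoop, pvALoop]
  | cons s xs ih =>
    intro pref total
    have htake : (pref ++ s :: xs).take pref.length = pref := by
      simp
    have hassoc : pref ++ s :: xs = (pref ++ [s]) ++ xs := by simp
    have hlen : pref.length + 1 = (pref ++ [s]).length := by simp
    by_cases hA : s == "A"
    · have hB : (s == "B") = false := by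
        cases h : s == "B"
        · rfl
        · exact absurd ((eq_of_beq hA).symm.trans (eq_of_beq h)) (by decide)
      simp only [pvBLoop, pvALoop, hA, hB, htake, if_false, if_true, Bool.false_eq_true]
      rw [hassoc, hlen, ih (pref ++ [s]) total, pvCountA_append, hA]
      simp
    · simp only [pvBLoop, pvALoop, hA, htake, Bool.false_eq_true, if_false]
      rw [hassoc, hlen, ih (pref ++ [s]) _, pvCountA_append]
      cases hB : s == "B" <;> simp [hA]

theorem policz_samchody_spec : Claim_equal_policz_samchody := by
  intro lista _
  unfold Spec_policz_samchody policz_samchody policz_samchody_alt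
  have := pvLoop_eq lista [] 0
  simpa [pvCountA] using this.symm
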